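-- pv_equiv track=rewrite | github.com/Su-minn/coding-test | Kakao_Problem/프렌즈4블록.py | find_4_block
-- ===== SOURCE A (Python) =====
-- def find_4_block(m, n, board):
--     is_4_block = [[False] * n for _ in range(m)]
--
--     for r, row_blocks in enumerate(board[:-1]):
--         for c, _ in enumerate(row_blocks[:-1]):
--             if (
--                 board[r][c] != -1
--                 and board[r][c]
--                 == board[r][c + 1]
--                 == board[r + 1][c]
--                 == board[r + 1][c + 1]
--             ):
--                 mark_is_4_block(r, c, is_4_block)
--
--     return is_4_block
--
-- def mark_is_4_block(row_idx, col_idx, is_4_block):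
--     for i, j in [(0, 0), (0, 1), (1, 0), (1, 1)]:
--         is_4_block[row_idx + i][col_idx + j] = True
-- ===== SOURCE B (Python) =====
-- def find_4_block(m, n, board):
--     origins = {(r, c)
--                for r in range(len(board) - 1)
--                for c in range(len(board[r]) - 1)
--                if board[r][c] != -1
--                and board[r][c] == board[r][c + 1] == board[r + 1][c] == board[r + 1][c + 1]}
--     return [[any(o in origins for o in ((i - 1, j - 1), (i - 1, j), (i, j - 1), (i, j)))
--              for j in range(n)]
--             for i in range(m)]
-- ===== Notes on version B (the rewrite author's own statement) =====
-- stated objective: alternative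
-- what changed: Replaces the imperative mark-and-mutate pass (each matching 2x2 origin pushes True into four cells of a mutable grid) by two pure comprehensions: a set of matching block origins built first, then each cell of the m x n grid derived by membership tests on the four origins that could cover it.
import Mathlib
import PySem

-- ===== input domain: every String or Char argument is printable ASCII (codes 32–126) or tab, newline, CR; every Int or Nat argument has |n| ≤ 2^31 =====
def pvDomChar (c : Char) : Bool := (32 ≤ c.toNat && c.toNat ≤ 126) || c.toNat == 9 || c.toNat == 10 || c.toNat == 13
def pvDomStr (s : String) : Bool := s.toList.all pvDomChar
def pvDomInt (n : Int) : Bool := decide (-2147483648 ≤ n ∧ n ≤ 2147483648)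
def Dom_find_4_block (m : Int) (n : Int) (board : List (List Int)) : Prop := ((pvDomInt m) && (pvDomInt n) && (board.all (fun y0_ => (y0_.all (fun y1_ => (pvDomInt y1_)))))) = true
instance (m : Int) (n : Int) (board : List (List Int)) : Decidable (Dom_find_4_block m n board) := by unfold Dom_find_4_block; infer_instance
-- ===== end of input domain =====

-- B replaces A's imperative mark-and-mutate pass (each matching 2x2 origin writes True into
-- four cells of a mutable grid) by two pure comprehensions: a match table over block
-- origins, then each cell derived from the in-bounds origins covering it.

-- ===== PORT A =====
-- helper mark_is_4_block: the four in-place assignments (indices in range under Pre_)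
def pvMark (row_idx col_idx : Int) (is_4_block : List (List Bool)) : List (List Bool) :=
  [((0 : Int), (0 : Int)), (0, 1), (1, 0), (1, 1)].foldl
    (fun g ij => g.modify (row_idx + ij.1).toNat (fun row => row.set (col_idx + ij.2).toNat true))
    is_4_block

def find_4_block (m : Int) (n : Int) (board : List (List Int)) : List (List Bool) :=
  let init := (List.range m.toNat).map (fun _ => List.replicate n.toNat false)
  (PySem.List.enumerate board.dropLast 0).foldl
    (fun g rrow =>
      (PySem.List.enumerate rrow.2.dropLast 0).foldl
        (fun g cx =>
          if PySem.List.pyGetD (PySem.List.pyGetD board rrow.1 []) cx.1 0 ≠ -1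
             ∧ PySem.List.pyGetD (PySem.List.pyGetD board rrow.1 []) cx.1 0
               = PySem.List.pyGetD (PySem.List.pyGetD board rrow.1 []) (cx.1 + 1) 0
             ∧ PySem.List.pyGetD (PySem.List.pyGetD board rrow.1 []) (cx.1 + 1) 0
               = PySem.List.pyGetD (PySem.List.pyGetD board (rrow.1 + 1) []) cx.1 0
             ∧ PySem.List.pyGetD (PySem.List.pyGetD board (rrow.1 + 1) []) cx.1 0
               = PySem.List.pyGetD (PySem.List.pyGetD board (rrow.1 + 1) []) (cx.1 + 1) 0
          then pvMark rrow.1 cx.1 g else g)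
        g)
    init

-- ===== PORT B =====
def find_4_block_alt (m : Int) (n : Int) (board : List (List Int)) : List (List Bool) :=
  let origins : PySem.Set (Int × Int) :=
    (PySem.List.pyRange 0 ((board.length : Int) - 1) 1).foldl (fun s r =>
      (PySem.List.pyRange 0 (((PySem.List.pyGetD board r []).length : Int) - 1) 1).foldl (fun s c =>
        if PySem.List.pyGetD (PySem.List.pyGetD board r []) c 0 ≠ -1
             ∧ PySem.List.pyGetD (PySem.List.pyGetD board r []) c 0
               = PySem.List.pyGetD (PySem.List.pyGetD board r []) (c + 1) 0
             ∧ PySem.List.pyGetD (PySem.List.pyGetD board r []) (c + 1) 0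
               = PySem.List.pyGetD (PySem.List.pyGetD board (r + 1) []) c 0
             ∧ PySem.List.pyGetD (PySem.List.pyGetD board (r + 1) []) c 0
               = PySem.List.pyGetD (PySem.List.pyGetD board (r + 1) []) (c + 1) 0
        then PySem.Set.add s (r, c) else s) s)
      PySem.Set.empty
  (PySem.List.pyRange 0 m 1).map (fun i =>
    (PySem.List.pyRange 0 n 1).map (fun j =>
      [(i - 1, j - 1), (i - 1, j), (i, j - 1), (i, j)].any (fun o =>
        PySem.Set.contains origins o)))

-- ===== PRECONDITION & SPEC =====
-- Pre_ excludes exactly the inputs on which A raises an IndexError: a (possibly partial,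
-- short-circuit-reached) 2x2 match whose next-row reads run past a shorter jagged row, or a
-- full match that would be marked outside the m x n grid.
def Pre_find_4_block (m : Int) (n : Int) (board : List (List Int)) : Prop :=
  ∀ r < board.length, ∀ c < (board.getD r []).length,
    r + 1 < board.length → c + 1 < (board.getD r []).length →
    (board.getD r []).getD c 0 ≠ -1 →
    (board.getD r []).getD c 0 = (board.getD r []).getD (c + 1) 0 →
    c < (board.getD (r + 1) []).length ∧
      ((board.getD r []).getD (c + 1) 0 = (board.getD (r + 1) []).getD c 0 →
        c + 1 < (board.getD (r + 1) []).length ∧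
          ((board.getD (r + 1) []).getD c 0 = (board.getD (r + 1) []).getD (c + 1) 0 →
            (r : Int) + 1 < m ∧ (c : Int) + 1 < n))
instance (m : Int) (n : Int) (board : List (List Int)) : Decidable (Pre_find_4_block m n board) := by
  unfold Pre_find_4_block
  exact @Nat.decidableBallLT _ _ (fun _ _ => @Nat.decidableBallLT _ _ (fun _ _ => inferInstance))

def pvWitness_find_4_block : Int × Int × List (List Int) := (2, 2, [[1, 1], [1, 1]])

def Spec_find_4_block (m : Int) (n : Int) (board : List (List Int)) (out : List (List Bool)) : Prop := out = find_4_block_alt m n board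
instance (m : Int) (n : Int) (board : List (List Int)) (out : List (List Bool)) : Decidable (Spec_find_4_block m n board out) := by unfold Spec_find_4_block; infer_instance

-- ===== CLAIM (what is proved, stated in full; the proofs are below) =====
def Claim_equal_find_4_block : Prop := ∀ (m : Int) (n : Int) (board : List (List Int)), Dom_find_4_block m n board → Pre_find_4_block m n board → Spec_find_4_block m n board (find_4_block m n board)

-- ===== LEMMAS AND PROOFS =====

-- the cell value and the rectangular-shape invariant used to reason about A's mutable grid
def pvCell (g : List (List Bool)) (i j : Nat) : Bool := (g.getD i []).getD j false

def pvShape (g : List (List Bool)) (M N : Nat) : Prop :=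
  g.length = M ∧ ∀ row ∈ g, row.length = N

-- A's condition on a block origin, as a Bool (the decide of the port's if-condition)
def pvCond (board : List (List Int)) (r c : Int) : Bool :=
  decide (PySem.List.pyGetD (PySem.List.pyGetD board r []) c 0 ≠ -1
    ∧ PySem.List.pyGetD (PySem.List.pyGetD board r []) c 0
      = PySem.List.pyGetD (PySem.List.pyGetD board r []) (c + 1) 0
    ∧ PySem.List.pyGetD (PySem.List.pyGetD board r []) (c + 1) 0
      = PySem.List.pyGetD (PySem.List.pyGetD board (r + 1) []) c 0
    ∧ PySem.List.pyGetD (PySem.List.pyGetD board (r + 1) []) c 0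
      = PySem.List.pyGetD (PySem.List.pyGetD board (r + 1) []) (c + 1) 0)

theorem pvShape_modify_set (g : List (List Bool)) (M N a b : Nat)
    (h : pvShape g M N) : pvShape (g.modify a (fun row => row.set b true)) M N := by
  rcases h with ⟨h1, h2⟩
  refine ⟨by simp [h1], ?_⟩
  intro row hrow
  rw [List.mem_iff_getElem?] at hrow
  obtain ⟨k, hk⟩ := hrow
  rw [List.getElem?_modify] at hk
  by_cases hak : a = k
  · subst hak
    cases hg : g[a]? with
    | none => simp [hg] at hk
    | some r0 =>
      simp [hg] at hk
      rw [← hk]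
      simpa using h2 r0 (List.mem_of_getElem? hg)
  · simp [hak] at hk
    exact h2 row (List.mem_of_getElem? hk)

theorem pvCell_modify_set (g : List (List Bool)) (a b i j : Nat) :
    pvCell (g.modify a (fun row => row.set b true)) i j
      = if i = a ∧ j = b ∧ i < g.length ∧ j < (g.getD i []).length then true else pvCell g i j := by
  unfold pvCell
  simp only [List.getD_eq_getElem?_getD]
  rw [List.getElem?_modify]
  by_cases hia : i = a
  · subst hia
    cases hg : g[i]? with
    | none =>
      have hlen : ¬ i < g.length := by
        simpa [List.getElem?_eq_none_iff] using hg
      simp [hlen]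
    | some r0 =>
      have hlen : i < g.length := (List.getElem?_eq_some_iff.mp hg).1
      simp only [Option.map_eq_map, Option.map_some, Option.getD_some, if_true]
      rw [List.getElem?_set]
      by_cases hjb : b = j
      · subst hjb
        by_cases hbl : b < r0.length
        · simp [hbl, hlen]
        · simp [hbl, hlen]
      · have hbj : j ≠ b := fun h => hjb h.symm
        simp [hjb, hbj]
  · simp [hia, Ne.symm hia]

theorem pvShape_mark (g : List (List Bool)) (M N : Nat) (r c : Int)
    (h : pvShape g M N) : pvShape (pvMark r c g) M N := by
  unfold pvMark
  simp only [List.foldl_cons, List.foldl_nil]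
  exact pvShape_modify_set _ _ _ _ _ (pvShape_modify_set _ _ _ _ _
    (pvShape_modify_set _ _ _ _ _ (pvShape_modify_set _ _ _ _ _ h)))

theorem pvShape_getD_length (g : List (List Bool)) (M N i : Nat)
    (h : pvShape g M N) (hi : i < M) : (g.getD i []).length = N := by
  rcases h with ⟨h1, h2⟩
  have : i < g.length := by omega
  rw [List.getD_eq_getElem?_getD, List.getElem?_eq_getElem this]
  exact h2 _ (List.getElem_mem this)

theorem pvCell_mark (g : List (List Bool)) (M N i j : Nat) (r c : Int)
    (hsh : pvShape g M N) (hi : i < M) (hj : j < N) (hr : 0 ≤ r) (hc : 0 ≤ c) :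
    pvCell (pvMark r c g) i j
      = (pvCell g i j
          || (decide ((i : Int) = r ∨ (i : Int) = r + 1)
              && decide ((j : Int) = c ∨ (j : Int) = c + 1))) := by
  have s1 := pvShape_modify_set g M N (r+0).toNat (c+0).toNat hsh
  have s2 := pvShape_modify_set _ M N (r+0).toNat (c+1).toNat s1
  have s3 := pvShape_modify_set _ M N (r+1).toNat (c+0).toNat s2
  unfold pvMark
  simp only [List.foldl_cons, List.foldl_nil]
  rw [pvCell_modify_set, pvCell_modify_set, pvCell_modify_set, pvCell_modify_set]
  rw [pvShape_getD_length _ M N i s3 hi, pvShape_getD_length _ M N i s2 hi,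
      pvShape_getD_length _ M N i s1 hi, pvShape_getD_length _ M N i hsh hi]
  rw [s3.1, s2.1, s1.1, hsh.1]
  by_cases h1 : (i : Int) = r ∨ (i : Int) = r + 1
  · by_cases h2 : (j : Int) = c ∨ (j : Int) = c + 1
    · simp only [h1, h2, decide_true, Bool.and_true, Bool.or_true]
      split_ifs <;> first | rfl | (exfalso; omega)
    · simp only [h2, decide_false, Bool.and_false, Bool.or_false]
      split_ifs <;> first | rfl | (exfalso; omega)
  · simp only [h1, decide_false, Bool.false_and, Bool.or_false]
    split_ifs <;> first | rfl | (exfalso; omega)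

theorem pvShape_foldl_mark (L : List (Int × Int)) (p : Int × Int → Bool)
    (g : List (List Bool)) (M N : Nat) (h : pvShape g M N) :
    pvShape (L.foldl (fun g x => if p x then pvMark x.1 x.2 g else g) g) M N := by
  induction L generalizing g with
  | nil => simpa using h
  | cons x L ih =>
    simp only [List.foldl_cons]
    by_cases hp : p x
    · exact ih _ (by simpa [hp] using pvShape_mark g M N x.1 x.2 h)
    · simpa [hp] using ih _ h

theorem pvCell_foldl_mark (L : List (Int × Int)) (p : Int × Int → Bool)
    (g : List (List Bool)) (M N i j : Nat) (hsh : pvShape g M N)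
    (hL : ∀ x ∈ L, 0 ≤ x.1 ∧ 0 ≤ x.2) (hi : i < M) (hj : j < N) :
    pvCell (L.foldl (fun g x => if p x then pvMark x.1 x.2 g else g) g) i j
      = (pvCell g i j
          || L.any (fun x => p x
              && (decide ((i : Int) = x.1 ∨ (i : Int) = x.1 + 1)
                  && decide ((j : Int) = x.2 ∨ (j : Int) = x.2 + 1)))) := by
  induction L generalizing g with
  | nil => simp
  | cons x L ih =>
    simp only [List.foldl_cons, List.any_cons]
    by_cases hp : p x
    · have hx := hL x (by simp)
      have hm : pvShape (pvMark x.1 x.2 g) M N := pvShape_mark g M N x.1 x.2 hsh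
      simp only [hp, if_true]
      rw [ih (pvMark x.1 x.2 g) hm (fun y hy => hL y (List.mem_cons_of_mem _ hy))]
      rw [pvCell_mark g M N i j x.1 x.2 hsh hi hj hx.1 hx.2]
      simp [Bool.or_assoc]
    · rw [if_neg hp, ih _ hsh (fun y hy => hL y (List.mem_cons_of_mem _ hy))]
      simp [hp]

-- a nested fold over enumerated rows/cells is a fold over the flattened index pairs
theorem pvFoldl_nested {α β γ : Type} (outer : List α) (inner : α → List β)
    (k1 : α → Int) (k2 : β → Int) (step : γ → Int → Int → γ) (g0 : γ) :
    outer.foldl (fun g a => (inner a).foldl (fun g b => step g (k1 a) (k2 b)) g) g0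
      = (outer.flatMap (fun a => (inner a).map (fun b => (k1 a, k2 b)))).foldl
          (fun g x => step g x.1 x.2) g0 := by
  induction outer generalizing g0 with
  | nil => rfl
  | cons a outer ih =>
    simp only [List.foldl_cons, List.flatMap_cons, List.foldl_append, List.foldl_map]
    exact ih _

theorem pvInit_eq (M N : Nat) :
    (List.range M).map (fun _ => List.replicate N false)
      = List.replicate M (List.replicate N false) := by
  simp [List.map_const']

-- A as a single fold over the flattened index pairs
theorem pvA_eq_foldl (m n : Int) (board : List (List Int)) :
    find_4_block m n board
      = ((PySem.List.enumerate board.dropLast 0).flatMap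
          (fun a => (PySem.List.enumerate a.2.dropLast 0).map (fun b => (a.1, b.1)))).foldl
          (fun g x => if pvCond board x.1 x.2 then pvMark x.1 x.2 g else g)
          (List.replicate m.toNat (List.replicate n.toNat false)) := by
  have h := pvFoldl_nested (PySem.List.enumerate board.dropLast 0)
    (fun a => PySem.List.enumerate a.2.dropLast 0) Prod.fst Prod.fst
    (fun g r c =>
        if PySem.List.pyGetD (PySem.List.pyGetD board r []) c 0 ≠ -1
             ∧ PySem.List.pyGetD (PySem.List.pyGetD board r []) c 0
               = PySem.List.pyGetD (PySem.List.pyGetD board r []) (c + 1) 0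
             ∧ PySem.List.pyGetD (PySem.List.pyGetD board r []) (c + 1) 0
               = PySem.List.pyGetD (PySem.List.pyGetD board (r + 1) []) c 0
             ∧ PySem.List.pyGetD (PySem.List.pyGetD board (r + 1) []) c 0
               = PySem.List.pyGetD (PySem.List.pyGetD board (r + 1) []) (c + 1) 0
        then pvMark r c g else g)
    ((List.range m.toNat).map (fun _ => List.replicate n.toNat false))
  have hfun : (fun (g : List (List Bool)) (x : Int × Int) =>
        if PySem.List.pyGetD (PySem.List.pyGetD board x.1 []) x.2 0 ≠ -1
             ∧ PySem.List.pyGetD (PySem.List.pyGetD board x.1 []) x.2 0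
               = PySem.List.pyGetD (PySem.List.pyGetD board x.1 []) (x.2 + 1) 0
             ∧ PySem.List.pyGetD (PySem.List.pyGetD board x.1 []) (x.2 + 1) 0
               = PySem.List.pyGetD (PySem.List.pyGetD board (x.1 + 1) []) x.2 0
             ∧ PySem.List.pyGetD (PySem.List.pyGetD board (x.1 + 1) []) x.2 0
               = PySem.List.pyGetD (PySem.List.pyGetD board (x.1 + 1) []) (x.2 + 1) 0
        then pvMark x.1 x.2 g else g)
      = (fun g x => if pvCond board x.1 x.2 then pvMark x.1 x.2 g else g) := by
    funext g x
    by_cases hc : PySem.List.pyGetD (PySem.List.pyGetD board x.1 []) x.2 0 ≠ -1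
             ∧ PySem.List.pyGetD (PySem.List.pyGetD board x.1 []) x.2 0
               = PySem.List.pyGetD (PySem.List.pyGetD board x.1 []) (x.2 + 1) 0
             ∧ PySem.List.pyGetD (PySem.List.pyGetD board x.1 []) (x.2 + 1) 0
               = PySem.List.pyGetD (PySem.List.pyGetD board (x.1 + 1) []) x.2 0
             ∧ PySem.List.pyGetD (PySem.List.pyGetD board (x.1 + 1) []) x.2 0
               = PySem.List.pyGetD (PySem.List.pyGetD board (x.1 + 1) []) (x.2 + 1) 0
    · rw [if_pos hc, if_pos (by simp only [pvCond, decide_eq_true_eq]; exact hc)]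
    · rw [if_neg hc, if_neg (by simp only [pvCond, decide_eq_true_eq]; exact hc)]
  have h2 : find_4_block m n board
      = ((PySem.List.enumerate board.dropLast 0).flatMap
          (fun a => (PySem.List.enumerate a.2.dropLast 0).map (fun b => (a.1, b.1)))).foldl
          (fun (g : List (List Bool)) (x : Int × Int) =>
            if PySem.List.pyGetD (PySem.List.pyGetD board x.1 []) x.2 0 ≠ -1
             ∧ PySem.List.pyGetD (PySem.List.pyGetD board x.1 []) x.2 0
               = PySem.List.pyGetD (PySem.List.pyGetD board x.1 []) (x.2 + 1) 0
             ∧ PySem.List.pyGetD (PySem.List.pyGetD board x.1 []) (x.2 + 1) 0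
               = PySem.List.pyGetD (PySem.List.pyGetD board (x.1 + 1) []) x.2 0
             ∧ PySem.List.pyGetD (PySem.List.pyGetD board (x.1 + 1) []) x.2 0
               = PySem.List.pyGetD (PySem.List.pyGetD board (x.1 + 1) []) (x.2 + 1) 0
            then pvMark x.1 x.2 g else g)
          ((List.range m.toNat).map (fun _ => List.replicate n.toNat false)) := h
  rw [h2, hfun, pvInit_eq]

theorem pvA_shape (m n : Int) (board : List (List Int)) :
    pvShape (find_4_block m n board) m.toNat n.toNat := by
  rw [pvA_eq_foldl]
  apply pvShape_foldl_mark
  constructor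
  · simp
  · intro row hrow
    simp only [List.mem_replicate] at hrow
    simp [hrow.2]

theorem pvCell_init (M N i j : Nat) :
    pvCell (List.replicate M (List.replicate N false)) i j = false := by
  simp only [pvCell, List.getD_eq_getElem?_getD, List.getElem?_replicate]
  split_ifs <;> simp

theorem pvA_cell (m n : Int) (board : List (List Int)) (i j : Nat)
    (hi : i < m.toNat) (hj : j < n.toNat) :
    pvCell (find_4_block m n board) i j = true ↔
      ∃ k l : Nat, k < board.length - 1 ∧ l < (board.getD k []).length - 1 ∧
        pvCond board (k : Int) (l : Int) = true ∧
        ((i : Int) = (k : Int) ∨ (i : Int) = (k : Int) + 1) ∧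
        ((j : Int) = (l : Int) ∨ (j : Int) = (l : Int) + 1) := by
  rw [pvA_eq_foldl]
  rw [pvCell_foldl_mark _ _ _ m.toNat n.toNat i j
      ⟨by simp, by intro row hrow; simp only [List.mem_replicate] at hrow; simp [hrow.2]⟩
      ?_ hi hj]
  · rw [pvCell_init]
    simp only [Bool.false_or, List.any_eq_true, List.mem_flatMap, List.mem_map]
    constructor
    · rintro ⟨x, ⟨a, ha, b, hb, rfl⟩, hx⟩
      rw [PySem.List.mem_enumerate_iff] at ha
      obtain ⟨k, hk, rfl⟩ := ha
      rw [PySem.List.mem_enumerate_iff] at hb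
      obtain ⟨l, hl, rfl⟩ := hb
      simp only [zero_add] at hx ⊢
      simp only [Bool.and_eq_true, decide_eq_true_eq] at hx
      have hkb : k < board.length := by
        simp only [List.length_dropLast] at hk; omega
      have hgd : board.getD k [] = board[k]'hkb := by
        rw [List.getD_eq_getElem?_getD, List.getElem?_eq_getElem hkb]
        rfl
      refine ⟨k, l, by simp only [List.length_dropLast] at hk; omega, ?_, hx.1, hx.2.1, hx.2.2⟩
      simp only [List.length_dropLast] at hl
      simp at hl
      rw [hgd]
      omega
    · rintro ⟨k, l, hk, hl, hc, hik, hjl⟩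
      have hkb : k < board.length := by omega
      have hkd : k < board.dropLast.length := by
        simp only [List.length_dropLast]; omega
      have hgd : board.getD k [] = board[k]'hkb := by
        rw [List.getD_eq_getElem?_getD, List.getElem?_eq_getElem hkb]
        rfl
      have hld : l < ((board.dropLast)[k]'hkd).dropLast.length := by
        rw [hgd] at hl
        simp
        omega
      refine ⟨((k : Int), (l : Int)), ⟨((k : Int), (board.dropLast)[k]'hkd), ?_,
        ((l : Int), ((board.dropLast)[k]'hkd).dropLast[l]'hld), ?_, rfl⟩, ?_⟩
      · rw [PySem.List.mem_enumerate_iff]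
        exact ⟨k, hkd, by simp⟩
      · rw [PySem.List.mem_enumerate_iff]
        exact ⟨l, hld, by simp⟩
      · simp only [Bool.and_eq_true, decide_eq_true_eq]
        exact ⟨hc, hik, hjl⟩
  · intro x hx
    simp only [List.mem_flatMap, List.mem_map] at hx
    obtain ⟨a, ha, b, hb, rfl⟩ := hx
    rw [PySem.List.mem_enumerate_iff] at ha
    obtain ⟨k, hk, rfl⟩ := ha
    rw [PySem.List.mem_enumerate_iff] at hb
    obtain ⟨l, hl, rfl⟩ := hb
    simp only [zero_add]
    exact ⟨Int.natCast_nonneg k, Int.natCast_nonneg l⟩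

theorem pvCell_eq_getElem (g : List (List Bool)) (i j : Nat)
    (hi : i < g.length) (hj : j < (g[i]'hi).length) : (g[i]'hi)[j]'hj = pvCell g i j := by
  unfold pvCell
  have h : g.getD i [] = g[i]'hi := by
    rw [List.getD_eq_getElem?_getD, List.getElem?_eq_getElem hi]
    rfl
  rw [h, List.getD_eq_getElem?_getD, List.getElem?_eq_getElem hj]
  rfl

theorem pvMem_foldl_add (L : List (Int × Int)) (p : Int × Int → Bool)
    (s0 : PySem.Set (Int × Int)) (y : Int × Int) :
    (y ∈ L.foldl (fun s x => if p x then PySem.Set.add s x else s) s0)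
      ↔ y ∈ s0 ∨ (y ∈ L ∧ p y = true) := by
  induction L generalizing s0 with
  | nil => simp
  | cons x L ih =>
    by_cases hp : p x
    · rw [List.foldl_cons, if_pos hp, ih]
      simp only [PySem.Set.mem_add, List.mem_cons]
      constructor
      · rintro ((hy | rfl) | ⟨hyL, hpy⟩)
        · exact Or.inl hy
        · exact Or.inr ⟨Or.inl rfl, hp⟩
        · exact Or.inr ⟨Or.inr hyL, hpy⟩
      · rintro (hy | ⟨(rfl | hyL), hpy⟩)
        · exact Or.inl (Or.inl hy)
        · exact Or.inl (Or.inr rfl)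
        · exact Or.inr ⟨hyL, hpy⟩
    · rw [List.foldl_cons, if_neg hp, ih]
      simp only [List.mem_cons]
      constructor
      · rintro (hy | ⟨hyL, hpy⟩)
        · exact Or.inl hy
        · exact Or.inr ⟨Or.inr hyL, hpy⟩
      · rintro (hy | ⟨(rfl | hyL), hpy⟩)
        · exact Or.inl hy
        · exact absurd hpy hp
        · exact Or.inr ⟨hyL, hpy⟩

-- B's origins set as a single conditional-add fold over the flattened index pairs
theorem pvOrigins_eq_foldl (board : List (List Int)) :
    ((PySem.List.pyRange 0 ((board.length : Int) - 1) 1).foldl (fun s r =>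
      (PySem.List.pyRange 0 (((PySem.List.pyGetD board r []).length : Int) - 1) 1).foldl (fun s c =>
        if PySem.List.pyGetD (PySem.List.pyGetD board r []) c 0 ≠ -1
             ∧ PySem.List.pyGetD (PySem.List.pyGetD board r []) c 0
               = PySem.List.pyGetD (PySem.List.pyGetD board r []) (c + 1) 0
             ∧ PySem.List.pyGetD (PySem.List.pyGetD board r []) (c + 1) 0
               = PySem.List.pyGetD (PySem.List.pyGetD board (r + 1) []) c 0
             ∧ PySem.List.pyGetD (PySem.List.pyGetD board (r + 1) []) c 0
               = PySem.List.pyGetD (PySem.List.pyGetD board (r + 1) []) (c + 1) 0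
        then PySem.Set.add s (r, c) else s) s)
      (PySem.Set.empty : PySem.Set (Int × Int)))
      = ((PySem.List.pyRange 0 ((board.length : Int) - 1) 1).flatMap (fun r =>
          (PySem.List.pyRange 0 (((PySem.List.pyGetD board r []).length : Int) - 1) 1).map
            (fun c => (r, c)))).foldl
          (fun s x => if pvCond board x.1 x.2 then PySem.Set.add s x else s)
          PySem.Set.empty := by
  have h := pvFoldl_nested (PySem.List.pyRange 0 ((board.length : Int) - 1) 1)
    (fun r => PySem.List.pyRange 0 (((PySem.List.pyGetD board r []).length : Int) - 1) 1)
    id id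
    (fun (s : PySem.Set (Int × Int)) r c =>
        if PySem.List.pyGetD (PySem.List.pyGetD board r []) c 0 ≠ -1
             ∧ PySem.List.pyGetD (PySem.List.pyGetD board r []) c 0
               = PySem.List.pyGetD (PySem.List.pyGetD board r []) (c + 1) 0
             ∧ PySem.List.pyGetD (PySem.List.pyGetD board r []) (c + 1) 0
               = PySem.List.pyGetD (PySem.List.pyGetD board (r + 1) []) c 0
             ∧ PySem.List.pyGetD (PySem.List.pyGetD board (r + 1) []) c 0
               = PySem.List.pyGetD (PySem.List.pyGetD board (r + 1) []) (c + 1) 0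
        then PySem.Set.add s (r, c) else s)
    PySem.Set.empty
  have hfun : (fun (s : PySem.Set (Int × Int)) (x : Int × Int) =>
        if PySem.List.pyGetD (PySem.List.pyGetD board x.1 []) x.2 0 ≠ -1
             ∧ PySem.List.pyGetD (PySem.List.pyGetD board x.1 []) x.2 0
               = PySem.List.pyGetD (PySem.List.pyGetD board x.1 []) (x.2 + 1) 0
             ∧ PySem.List.pyGetD (PySem.List.pyGetD board x.1 []) (x.2 + 1) 0
               = PySem.List.pyGetD (PySem.List.pyGetD board (x.1 + 1) []) x.2 0
             ∧ PySem.List.pyGetD (PySem.List.pyGetD board (x.1 + 1) []) x.2 0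
               = PySem.List.pyGetD (PySem.List.pyGetD board (x.1 + 1) []) (x.2 + 1) 0
        then PySem.Set.add s x else s)
      = (fun s x => if pvCond board x.1 x.2 then PySem.Set.add s x else s) := by
    funext s x
    by_cases hc : PySem.List.pyGetD (PySem.List.pyGetD board x.1 []) x.2 0 ≠ -1
             ∧ PySem.List.pyGetD (PySem.List.pyGetD board x.1 []) x.2 0
               = PySem.List.pyGetD (PySem.List.pyGetD board x.1 []) (x.2 + 1) 0
             ∧ PySem.List.pyGetD (PySem.List.pyGetD board x.1 []) (x.2 + 1) 0
               = PySem.List.pyGetD (PySem.List.pyGetD board (x.1 + 1) []) x.2 0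
             ∧ PySem.List.pyGetD (PySem.List.pyGetD board (x.1 + 1) []) x.2 0
               = PySem.List.pyGetD (PySem.List.pyGetD board (x.1 + 1) []) (x.2 + 1) 0
    · rw [if_pos hc, if_pos (by simp only [pvCond, decide_eq_true_eq]; exact hc)]
    · rw [if_neg hc, if_neg (by simp only [pvCond, decide_eq_true_eq]; exact hc)]
  rw [← hfun]
  exact h

theorem pvB_shape (m n : Int) (board : List (List Int)) :
    pvShape (find_4_block_alt m n board) m.toNat n.toNat := by
  constructor
  · simp [find_4_block_alt, PySem.List.length_pyRange_one]
  · intro row hrow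
    simp only [find_4_block_alt, List.mem_map] at hrow
    obtain ⟨r, _, rfl⟩ := hrow
    simp [PySem.List.length_pyRange_one]

theorem pvB_cell (m n : Int) (board : List (List Int)) (i j : Nat)
    (hi : i < m.toNat) (hj : j < n.toNat) :
    pvCell (find_4_block_alt m n board) i j = true ↔
      ∃ o ∈ [((i : Int) - 1, (j : Int) - 1), ((i : Int) - 1, (j : Int)),
             ((i : Int), (j : Int) - 1), ((i : Int), (j : Int))],
        (0 ≤ o.1 ∧ o.1 < (board.length : Int) - 1
          ∧ 0 ≤ o.2 ∧ o.2 < ((PySem.List.pyGetD board o.1 []).length : Int) - 1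
          ∧ pvCond board o.1 o.2 = true) := by
  unfold pvCell find_4_block_alt
  rw [pvOrigins_eq_foldl]
  have h1 : ∀ (f : Int → List Bool) (b : Int) (k : Nat), k < b.toNat →
      ((PySem.List.pyRange 0 b 1).map f).getD k [] = f (k : Int) := by
    intro f b k hk
    rw [List.getD_eq_getElem?_getD, List.getElem?_map, PySem.List.getElem?_pyRange_one]
    simp [hk]
  have h2 : ∀ (f : Int → Bool) (b : Int) (k : Nat), k < b.toNat →
      ((PySem.List.pyRange 0 b 1).map f).getD k false = f (k : Int) := by
    intro f b k hk
    rw [List.getD_eq_getElem?_getD, List.getElem?_map, PySem.List.getElem?_pyRange_one]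
    simp [hk]
  rw [h1 _ m i (by omega), h2 _ n j (by omega)]
  simp only [List.any_eq_true]
  constructor
  · rintro ⟨o, ho, hc⟩
    rw [PySem.Set.contains_iff, pvMem_foldl_add] at hc
    rcases hc with hc | ⟨hmem, hcond⟩
    · simp [PySem.Set.empty] at hc
    · simp only [List.mem_flatMap, List.mem_map] at hmem
      obtain ⟨r, hr, c, hcm, rfl⟩ := hmem
      rw [PySem.List.mem_pyRange_one] at hr
      rw [PySem.List.mem_pyRange_one] at hcm
      exact ⟨(r, c), ho, hr.1, hr.2, hcm.1, hcm.2, hcond⟩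
  · rintro ⟨o, ho, h0, h1', h2', h3', hcond⟩
    refine ⟨o, ho, ?_⟩
    rw [PySem.Set.contains_iff, pvMem_foldl_add]
    refine Or.inr ⟨?_, hcond⟩
    simp only [List.mem_flatMap, List.mem_map]
    refine ⟨o.1, ?_, o.2, ?_, rfl⟩
    · rw [PySem.List.mem_pyRange_one]; exact ⟨h0, h1'⟩
    · rw [PySem.List.mem_pyRange_one]; exact ⟨h2', h3'⟩

theorem pv_main (m n : Int) (board : List (List Int)) :
    find_4_block m n board = find_4_block_alt m n board := by
  have hA := pvA_shape m n board
  have hB := pvB_shape m n board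
  apply List.ext_getElem (by rw [hA.1, hB.1])
  intro i hiA hiB
  have hi : i < m.toNat := by rw [hA.1] at hiA; exact hiA
  have hrA : ((find_4_block m n board)[i]'hiA).length = n.toNat :=
    hA.2 _ (List.getElem_mem hiA)
  have hrB : ((find_4_block_alt m n board)[i]'hiB).length = n.toNat :=
    hB.2 _ (List.getElem_mem hiB)
  apply List.ext_getElem (by rw [hrA, hrB])
  intro j hjA hjB
  have hj : j < n.toNat := by rw [hrA] at hjA; exact hjA
  rw [pvCell_eq_getElem _ _ _ hiA hjA, pvCell_eq_getElem _ _ _ hiB hjB]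
  rw [Bool.eq_iff_iff, pvA_cell m n board i j hi hj, pvB_cell m n board i j hi hj]
  constructor
  · rintro ⟨k, l, hk, hl, hc, hik, hjl⟩
    have hkb : k < board.length := by omega
    have hgd : PySem.List.pyGetD board (k : Int) [] = board.getD k [] :=
      PySem.List.pyGetD_natCast board k []
    refine ⟨((k : Int), (l : Int)), ?_, by omega, by omega, by omega, ?_, hc⟩
    · simp only [List.mem_cons, List.not_mem_nil, or_false, Prod.mk.injEq]
      omega
    · rw [hgd]
      omega
  · rintro ⟨⟨o1, o2⟩, ho, h0, h1, h2, h3, hc⟩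
    simp only [List.mem_cons, List.not_mem_nil, or_false, Prod.mk.injEq] at ho
    have hoc : ((o1.toNat : Int)) = o1 := by omega
    have hod : ((o2.toNat : Int)) = o2 := by omega
    have hgd : PySem.List.pyGetD board o1 [] = board.getD o1.toNat [] := by
      conv_lhs => rw [← hoc]
      rw [PySem.List.pyGetD_natCast]
    refine ⟨o1.toNat, o2.toNat, by omega, ?_, ?_, by omega, by omega⟩
    · rw [hgd] at h3
      omega
    · rw [hoc, hod]
      exact hc

-- ===== VERDICT (by name: the statement is the Claim_ definition above) =====
theorem find_4_block_spec : Claim_equal_find_4_block := by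
  intro m n board _ _
  unfold Spec_find_4_block
  exact pv_main m n board
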